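-- pv_equiv track=rewrite | github.com/Mudhya19/Automatic-ICD-Based-Diagnosis-NLP-Spark | src/utils/utils.py | map_diagnosis_to_icd10
-- ===== SOURCE A (Python) =====
-- from typing import List, Dict, Optional
--
-- def map_diagnosis_to_icd10(entities: List[str], mapping_dict: Dict[str, str]) -> List[str]:
--     """
--     Map diagnosis entities to ICD-10 codes based on a mapping dictionary
--
--     Args:
--         entities: List of diagnosis entities detected
--         mapping_dict: Dictionary mapping terms to ICD-10 codes
--
--     Returns:
--         List of corresponding ICD-10 codes
--     """
--     icd_codes = []
--     if entities:
--         for entity in entities: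
--             entity_lower = entity.lower()
--             for key, code in mapping_dict.items():
--                 if key in entity_lower and code not in icd_codes:
--                     icd_codes.append(code)
--     return list(set(icd_codes))
-- ===== SOURCE B (Python) =====
-- def map_diagnosis_to_icd10(entities, mapping_dict):
--     maxlen = max((len(k) for k in mapping_dict), default=0)
--     icd = []
--     for entity in entities:
--         t = entity.lower()
--         subs = {t[i:j] for i in range(len(t) + 1)
--                        for j in range(i, min(i + maxlen, len(t)) + 1)}
--         icd += [code for key, code in mapping_dict.items() if key in subs]
--     return list(dict.fromkeys(icd))
-- ===== Notes on version B (the rewrite author's own statement) =====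
-- stated objective: alternative
-- what changed: Instead of scanning each entity text once per mapping key (a substring search per key), B builds per entity a hash set of all its substrings up to the longest key length and decides each key by a single set-membership lookup, deduplicating once at the end.
import Mathlib
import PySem

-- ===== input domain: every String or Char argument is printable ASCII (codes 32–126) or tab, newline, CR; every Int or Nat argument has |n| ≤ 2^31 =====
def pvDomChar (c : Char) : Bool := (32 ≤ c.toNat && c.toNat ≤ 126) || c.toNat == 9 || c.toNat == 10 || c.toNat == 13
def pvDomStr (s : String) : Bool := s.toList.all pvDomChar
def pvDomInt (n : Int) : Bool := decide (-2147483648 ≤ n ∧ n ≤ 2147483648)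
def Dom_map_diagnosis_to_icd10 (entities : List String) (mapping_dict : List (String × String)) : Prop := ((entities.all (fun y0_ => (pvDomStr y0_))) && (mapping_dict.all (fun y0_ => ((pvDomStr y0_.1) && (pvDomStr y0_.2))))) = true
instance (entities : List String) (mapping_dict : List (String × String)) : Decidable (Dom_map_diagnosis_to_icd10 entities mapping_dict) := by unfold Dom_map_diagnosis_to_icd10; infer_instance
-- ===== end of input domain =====

-- B replaces A's per-key substring scan of each entity by a per-entity hash set of all substrings
-- (capped at the longest mapping key) queried once per key; equivalence is about the returned value
-- (no argument is mutated). Python's list(set(...)) order is unspecified; the ports fix the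
-- first-occurrence order (PySem.Set.ofList).

-- ===== PORT A =====
def map_diagnosis_to_icd10 (entities : List String) (mapping_dict : List (String × String)) : List String :=
  let items := (PySem.Dict.ofList mapping_dict).items
  let icd_codes : List String :=
    if entities.isEmpty then []
    else
      entities.foldl (fun acc entity =>
        let entity_lower := PySem.Str.lower entity
        items.foldl (fun acc kc =>
          if PySem.Str.isIn kc.1 entity_lower && !acc.contains kc.2 then acc ++ [kc.2] else acc) acc) []
  PySem.Set.ofList icd_codes

-- ===== PORT B =====
-- the substring set {t[i:j] : 0 ≤ i ≤ j ≤ min(i+maxlen, len(t))}; Str.slice is exact for t[i:j]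
def pvSubs (t : String) (maxlen : Nat) : PySem.Set String :=
  PySem.Set.ofList ((List.range (t.length + 1)).flatMap (fun i =>
    (List.range' i (min (i + maxlen) t.length + 1 - i)).map (fun (j : Nat) =>
      PySem.Str.slice t (some (i : Int)) (some (j : Int)))))

def map_diagnosis_to_icd10_alt (entities : List String) (mapping_dict : List (String × String)) : List String :=
  let d := PySem.Dict.ofList mapping_dict
  let maxlen := (d.keys.map String.length).foldl max 0
  let icd := entities.foldl (fun acc entity =>
    acc ++ (d.items.filter (fun kc =>
      PySem.Set.contains (pvSubs (PySem.Str.lower entity) maxlen) kc.1)).map (fun kc => kc.2)) []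
  PySem.List.dedup icd

-- ===== PRECONDITION & SPEC =====
def Spec_map_diagnosis_to_icd10 (entities : List String) (mapping_dict : List (String × String)) (out : List String) : Prop := out = map_diagnosis_to_icd10_alt entities mapping_dict
instance (entities : List String) (mapping_dict : List (String × String)) (out : List String) : Decidable (Spec_map_diagnosis_to_icd10 entities mapping_dict out) := by unfold Spec_map_diagnosis_to_icd10; infer_instance

-- ===== CLAIM (what is proved, stated in full; the proofs are below) =====
def Claim_equal_map_diagnosis_to_icd10 : Prop := ∀ (entities : List String) (mapping_dict : List (String × String)), Dom_map_diagnosis_to_icd10 entities mapping_dict → Spec_map_diagnosis_to_icd10 entities mapping_dict (map_diagnosis_to_icd10 entities mapping_dict)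

-- ===== LEMMAS AND PROOFS =====

-- membership in the capped substring set ↔ infix of length ≤ maxlen
lemma mem_pvSubs (t key : String) (maxlen : Nat) :
    key ∈ pvSubs t maxlen ↔ key.toList <:+: t.toList ∧ key.length ≤ maxlen := by
  unfold pvSubs
  rw [PySem.Set.mem_ofList, List.mem_flatMap]
  constructor
  · rintro ⟨i, _, hmem⟩
    obtain ⟨j, hj, rfl⟩ := List.mem_map.1 hmem
    have hj' := List.mem_range'_1.1 hj
    constructor
    · rw [PySem.Str.toList_slice, PySem.Chars.slice_eq_listSlice, PySem.List.slice_natCast]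
      exact ((List.take_prefix _ _).isInfix).trans ((List.drop_suffix _ _).isInfix)
    · rw [← String.length_toList, PySem.Str.toList_slice, PySem.Chars.slice_eq_listSlice,
        PySem.List.slice_natCast]
      have h1 := List.length_take_le (j - i) (List.drop i t.toList)
      omega
  · rintro ⟨⟨u, v, huv⟩, hlen⟩
    have hL := congrArg List.length huv
    simp only [List.length_append, String.length_toList] at hL
    refine ⟨u.length, List.mem_range.2 (by omega),
      List.mem_map.2 ⟨u.length + key.length, List.mem_range'_1.2 ⟨by omega, by omega⟩, ?_⟩⟩
    rw [← String.toList_inj, PySem.Str.toList_slice, PySem.Chars.slice_eq_listSlice,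
      PySem.List.slice_natCast]
    have hd : List.drop u.length t.toList = key.toList ++ v := by
      rw [← huv, List.append_assoc, List.drop_left]
    rw [hd]
    have hk : u.length + key.length - u.length = key.toList.length := by
      rw [String.length_toList]; omega
    rw [hk, List.take_left]

-- the membership test in B's hash set agrees with A's substring test for every key of the dict
lemma contains_pvSubs (t key : String) (maxlen : Nat) (hk : key.length ≤ maxlen) :
    PySem.Set.contains (pvSubs t maxlen) key = PySem.Str.isIn key t := by
  rw [Bool.eq_iff_iff, PySem.Set.contains_iff, mem_pvSubs, PySem.Str.isIn_iff_infix]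
  tauto

-- A's inner loop over the dict items is Set.update with the codes of the matching keys.
lemma inner_loop_eq (items : List (String × String)) (t : String) (acc : List String) :
    items.foldl (fun acc kc =>
      if PySem.Str.isIn kc.1 t && !acc.contains kc.2 then acc ++ [kc.2] else acc) acc
    = PySem.Set.update acc ((items.filter (fun kc => PySem.Str.isIn kc.1 t)).map (fun kc => kc.2)) := by
  induction items generalizing acc with
  | nil => simp [PySem.Set.update]
  | cons kc rest ih =>
    simp only [List.foldl_cons, List.filter_cons]
    by_cases h : PySem.Str.isIn kc.1 t = true
    · rw [if_pos h, List.map_cons, PySem.Set.update_cons, ← ih]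
      congr 1
      simp only [h, Bool.true_and, PySem.Set.add]
      by_cases hc : kc.2 ∈ acc <;> simp [hc]
    · have h' : PySem.Str.isIn kc.1 t = false := by simpa using h
      rw [if_neg (by rw [h']; simp)]
      simp only [h', Bool.false_eq_true, if_false]
      exact ih acc

-- A's outer loop is Set.update with the concatenation of the per-entity hit lists.
lemma outer_loop_eq (entities : List String) (g : String → List String) (acc : List String) :
    entities.foldl (fun acc e => PySem.Set.update acc (g e)) acc
    = PySem.Set.update acc (entities.flatMap g) := by
  induction entities generalizing acc with
  | nil => simp [PySem.Set.update]
  | cons e rest ih => simp [ih, PySem.Set.update_append]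

-- ===== VERDICT (by name: the statement is the Claim_ definition above) =====
theorem map_diagnosis_to_icd10_spec : Claim_equal_map_diagnosis_to_icd10 := by
  intro entities mapping_dict _
  unfold Spec_map_diagnosis_to_icd10 map_diagnosis_to_icd10 map_diagnosis_to_icd10_alt
  dsimp only
  have hfilter : ∀ t : String,
      (PySem.Dict.ofList mapping_dict).items.filter (fun kc =>
        PySem.Set.contains
          (pvSubs t (((PySem.Dict.ofList mapping_dict).keys.map String.length).foldl max 0)) kc.1)
      = (PySem.Dict.ofList mapping_dict).items.filter (fun kc => PySem.Str.isIn kc.1 t) := by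
    intro t
    apply List.filter_congr
    intro kc hkc
    exact contains_pvSubs t kc.1 _
      ((PySem.List.le_foldl_max _ 0).2 _
        (List.mem_map_of_mem (PySem.Dict.mem_keys_of_mem_items _ hkc)))
  rw [PySem.List.foldl_append_eq_flatMap, PySem.List.dedup_eq_ofList]
  simp only [List.nil_append, hfilter]
  by_cases he : entities.isEmpty
  · simp_all [List.isEmpty_iff]
  · simp only [he, Bool.false_eq_true, if_false]
    rw [funext (fun acc => funext (fun (e : String) =>
      inner_loop_eq ((PySem.Dict.ofList mapping_dict).items) (PySem.Str.lower e) acc))]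
    rw [outer_loop_eq, PySem.Set.update_nil_left, PySem.Set.ofList_ofList]
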